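-- pv_equiv track=rewrite | github.com/selairi/blogclaseinvertida | generar.py | getContenido
-- ===== SOURCE A (Python) =====
-- def getContenido(texto):
--     linea_inicial = True
--     titulo = ''
--     html = ''
--     for linea in texto.split('\n'):
--         if linea_inicial:
--             titulo = linea
--             linea_inicial = False
--         else:
--             html += linea
--     return [titulo, html]
-- ===== SOURCE B (Python) =====
-- def getContenido(texto):
--     partes = texto.split('\n')
--     return [partes[0], ''.join(partes[1:])]
-- ===== Notes on version B (the rewrite author's own statement) =====
-- stated objective: simpler
-- what changed: The flag-driven accumulation loop is replaced by a single split plus a slice-and-join: partes[0] is the title and ''.join(partes[1:]) is the body, with no loop state at all.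
import Mathlib
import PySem

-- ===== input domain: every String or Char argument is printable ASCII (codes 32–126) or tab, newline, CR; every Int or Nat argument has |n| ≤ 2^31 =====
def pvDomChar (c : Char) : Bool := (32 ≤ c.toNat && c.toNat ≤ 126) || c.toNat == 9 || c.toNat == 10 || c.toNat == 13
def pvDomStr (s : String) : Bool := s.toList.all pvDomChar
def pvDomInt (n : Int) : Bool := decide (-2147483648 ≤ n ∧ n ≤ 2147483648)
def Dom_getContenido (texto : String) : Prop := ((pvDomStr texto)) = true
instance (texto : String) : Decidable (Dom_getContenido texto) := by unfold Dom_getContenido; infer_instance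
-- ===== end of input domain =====

-- B replaces A's flag-driven accumulation loop by a split plus slice-and-join (simpler decomposition, same cost).


-- ===== PORT A =====
-- state = (linea_inicial, titulo, html), exactly A's loop over texto.split('\n')
def getContenido (texto : String) : List String :=
  let st := (PySem.Chars.splitOn texto.toList ['\n']).foldl
      (fun (s : Bool × List Char × List Char) linea =>
        if s.1 then (false, linea, s.2.2) else (s.1, s.2.1, s.2.2 ++ linea))
      (true, [], [])
  [String.ofList st.2.1, String.ofList st.2.2]

-- ===== PORT B =====
-- partes[0]: str.split always returns a nonempty list, so headD's default is unreachable
def getContenido_alt (texto : String) : List String :=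
  let partes := PySem.Chars.splitOn texto.toList ['\n']
  [String.ofList (partes.headD []),
   String.ofList (PySem.Chars.join [] (PySem.List.slice partes (some 1) none))]

-- ===== PRECONDITION & SPEC =====
def Spec_getContenido (texto : String) (out : List String) : Prop := out = getContenido_alt texto
instance (texto : String) (out : List String) : Decidable (Spec_getContenido texto out) := by unfold Spec_getContenido; infer_instance

-- ===== CLAIM (what is proved, stated in full; the proofs are below) =====
def Claim_equal_getContenido : Prop := ∀ (texto : String), Dom_getContenido texto → Spec_getContenido texto (getContenido texto)

-- ===== LEMMAS AND PROOFS =====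

theorem join0_cons (q : List Char) (rest : List (List Char)) :
    PySem.Chars.join [] (q :: rest) = q ++ PySem.Chars.join [] rest := by
  cases rest with
  | nil => simp [PySem.Chars.join_singleton, PySem.Chars.join_nil]
  | cons r rs => simp [PySem.Chars.join_cons_cons]

theorem fold_body (rest : List (List Char)) (t h : List Char) :
    rest.foldl
      (fun (s : Bool × List Char × List Char) linea =>
        if s.1 then (false, linea, s.2.2) else (s.1, s.2.1, s.2.2 ++ linea))
      (false, t, h)
    = (false, t, h ++ PySem.Chars.join [] rest) := by
  induction rest generalizing h with
  | nil => simp [PySem.Chars.join_nil]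
  | cons q rs ih => simp [List.foldl, ih, join0_cons, List.append_assoc]

-- ===== VERDICT (by name: the statement is the Claim_ definition above) =====
theorem getContenido_spec : Claim_equal_getContenido := by
  intro texto _
  unfold Spec_getContenido getContenido getContenido_alt
  cases hps : PySem.Chars.splitOn texto.toList ['\n'] with
  | nil => simp [PySem.Chars.join_nil, PySem.List.slice]
  | cons p rest =>
    simp [List.foldl, fold_body, PySem.List.slice_from_one]
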